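-- pv_equiv track=rewrite | github.com/lampita/Python-GCBA | clase_6.py | filtrar_nombres
-- ===== SOURCE A (Python) =====
-- def filtrar_nombres(lista_nombres):
--     nombres_validos = []
--     nombres_invalidos = []
--
--     for nombre in lista_nombres:
--         if not nombre.strip():
--             nombres_invalidos.append((nombre, "Está vacío o solo contiene espacios"))
--             continue
--
--         palabras = nombre.split()
--
--         if len(palabras) < 2:
--             nombres_invalidos.append((nombre, "No tiene al menos dos palabras"))
--             continue
--
--         if any(char.isdigit() for char in nombre):
--             nombres_invalidos.append((nombre, "Contiene números"))
--             continue
--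
--         if any(not char.isalpha() and not char.isspace() for char in nombre):
--             nombres_invalidos.append((nombre, "Contiene caracteres especiales"))
--             continue
--
--         nombres_validos.append(" ".join(palabras))
--
--     return nombres_validos, nombres_invalidos
-- ===== SOURCE B (Python) =====
-- def _clasificar(nombre):
--     palabras = []
--     actual = []
--     tiene_digito = False
--     tiene_especial = False
--     for c in nombre:
--         if c.isspace():
--             if actual:
--                 palabras.append(''.join(actual))
--                 actual = []
--         else:
--             actual.append(c)
--             if c.isdigit():
--                 tiene_digito = True
--             elif not c.isalpha():
--                 tiene_especial = True
--     if actual: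
--         palabras.append(''.join(actual))
--     if not palabras:
--         return False, "Está vacío o solo contiene espacios"
--     if len(palabras) < 2:
--         return False, "No tiene al menos dos palabras"
--     if tiene_digito:
--         return False, "Contiene números"
--     if tiene_especial:
--         return False, "Contiene caracteres especiales"
--     return True, ' '.join(palabras)
--
--
-- def filtrar_nombres(lista_nombres):
--     validos = []
--     invalidos = []
--     for nombre in lista_nombres:
--         ok, texto = _clasificar(nombre)
--         if ok:
--             validos.append(texto)
--         else:
--             invalidos.append((nombre, texto))
--     return validos, invalidos
-- ===== Notes on version B (the rewrite author's own statement) =====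
-- stated objective: alternative
-- what changed: Replaced A's per-name chain of built-in scans (strip, split, and two any() passes over the string) by a helper that classifies each name in a single character pass, accumulating the word list and digit/special-character flags in one traversal and returning a tagged (ok, text) pair.
import Mathlib
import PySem

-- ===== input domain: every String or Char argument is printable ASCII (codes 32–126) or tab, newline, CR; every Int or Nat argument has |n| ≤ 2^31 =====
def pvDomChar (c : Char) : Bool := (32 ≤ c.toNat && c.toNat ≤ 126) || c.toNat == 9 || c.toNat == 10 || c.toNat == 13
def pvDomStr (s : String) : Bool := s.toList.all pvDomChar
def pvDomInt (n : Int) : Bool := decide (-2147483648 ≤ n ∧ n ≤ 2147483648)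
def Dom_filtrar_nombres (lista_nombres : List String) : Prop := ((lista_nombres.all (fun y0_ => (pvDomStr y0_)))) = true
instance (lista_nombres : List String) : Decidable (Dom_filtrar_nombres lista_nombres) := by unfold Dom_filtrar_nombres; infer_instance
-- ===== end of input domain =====

-- B replaces A's per-name chain of built-in scans (strip / split / two any-passes) by a single
-- character-pass classifier computing the word list and digit/special flags in one traversal
-- (objective: alternative; same asymptotic cost).


-- ===== PORT A =====
def filtrar_nombres (lista_nombres : List String) : List String × (List (String × String)) :=
  lista_nombres.foldl (fun acc nombre =>
    if PySem.Str.strip nombre = "" then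
      (acc.1, acc.2 ++ [(nombre, "Está vacío o solo contiene espacios")])
    else
      let palabras := PySem.Str.split₀ nombre
      if palabras.length < 2 then
        (acc.1, acc.2 ++ [(nombre, "No tiene al menos dos palabras")])
      else if nombre.toList.any PySem.Chars.isdigit then
        (acc.1, acc.2 ++ [(nombre, "Contiene números")])
      else if nombre.toList.any (fun c => !PySem.Chars.isalpha c && !PySem.Chars.isspace c) then
        (acc.1, acc.2 ++ [(nombre, "Contiene caracteres especiales")])
      else
        (acc.1 ++ [PySem.Str.join " " palabras], acc.2)) ([], [])

-- ===== PORT B =====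
-- one step of B's single character pass: state = (palabras, actual, tiene_digito, tiene_especial)
def pvPaso (st : List String × List Char × Bool × Bool) (c : Char) : List String × List Char × Bool × Bool :=
  if PySem.Chars.isspace c then
    if st.2.1.isEmpty then st else (st.1 ++ [String.ofList st.2.1], [], st.2.2.1, st.2.2.2)
  else
    if PySem.Chars.isdigit c then (st.1, st.2.1 ++ [c], true, st.2.2.2)
    else if !PySem.Chars.isalpha c then (st.1, st.2.1 ++ [c], st.2.2.1, true)
    else (st.1, st.2.1 ++ [c], st.2.2.1, st.2.2.2)

def pvClasificar (nombre : String) : Bool × String :=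
  let st := nombre.toList.foldl pvPaso ([], [], false, false)
  let palabras := if st.2.1.isEmpty then st.1 else st.1 ++ [String.ofList st.2.1]
  if palabras.isEmpty then (false, "Está vacío o solo contiene espacios")
  else if palabras.length < 2 then (false, "No tiene al menos dos palabras")
  else if st.2.2.1 then (false, "Contiene números")
  else if st.2.2.2 then (false, "Contiene caracteres especiales")
  else (true, PySem.Str.join " " palabras)

def filtrar_nombres_alt (lista_nombres : List String) : List String × (List (String × String)) :=
  lista_nombres.foldl (fun acc nombre =>
    let r := pvClasificar nombre
    if r.1 then (acc.1 ++ [r.2], acc.2) else (acc.1, acc.2 ++ [(nombre, r.2)])) ([], [])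

-- ===== PRECONDITION & SPEC =====
def Spec_filtrar_nombres (lista_nombres : List String) (out : List String × (List (String × String))) : Prop := out = filtrar_nombres_alt lista_nombres
instance (lista_nombres : List String) (out : List String × (List (String × String))) : Decidable (Spec_filtrar_nombres lista_nombres out) := by unfold Spec_filtrar_nombres; infer_instance

-- ===== CLAIM (what is proved, stated in full; the proofs are below) =====
def Claim_equal_filtrar_nombres : Prop := ∀ (lista_nombres : List String), Dom_filtrar_nombres lista_nombres → Spec_filtrar_nombres lista_nombres (filtrar_nombres lista_nombres)

-- ===== LEMMAS AND PROOFS =====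

lemma pv_go_acc (cs : List Char) : ∀ (cur : List Char) (accl : List (List Char)),
    PySem.Chars.split₀.go cs cur accl = accl.reverse ++ PySem.Chars.split₀.go cs cur [] := by
  induction cs with
  | nil =>
    intro cur accl
    by_cases h : cur.isEmpty <;> simp [PySem.Chars.split₀.go, h]
  | cons c rest ih =>
    intro cur accl
    simp only [PySem.Chars.split₀.go]
    by_cases hs : PySem.Chars.isspace c <;> by_cases hc : cur.isEmpty <;>
      simp only [hs, hc, if_true, if_false, Bool.false_eq_true, ite_true, ite_false]
    · exact ih [] accl
    · rw [ih [] (cur.reverse :: accl), ih [] [cur.reverse]]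
      simp
    · exact ih (c :: cur) accl
    · exact ih (c :: cur) accl

lemma pv_go_cur_ne_nil (cs : List Char) : ∀ (cur : List Char), cur ≠ [] →
    PySem.Chars.split₀.go cs cur [] ≠ [] := by
  induction cs with
  | nil =>
    intro cur h
    simp [PySem.Chars.split₀.go, h]
  | cons c rest ih =>
    intro cur h
    simp only [PySem.Chars.split₀.go]
    by_cases hs : PySem.Chars.isspace c <;>
      simp only [hs, if_true, if_false, Bool.false_eq_true, ite_true, ite_false]
    · have hce : cur.isEmpty = false := by simp [h]
      simp only [hce, Bool.false_eq_true, if_false, ite_false]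
      rw [pv_go_acc rest [] [cur.reverse]]
      simp
    · exact ih (c :: cur) (by simp)

lemma pv_split_nil (cs : List Char) :
    (PySem.Chars.split₀ cs = []) ↔ ∀ c ∈ cs, PySem.Chars.isspace c = true := by
  unfold PySem.Chars.split₀
  induction cs with
  | nil => simp [PySem.Chars.split₀.go]
  | cons c rest ih =>
    simp only [PySem.Chars.split₀.go]
    by_cases hs : PySem.Chars.isspace c <;>
      simp only [hs, List.isEmpty_nil, if_true, if_false, Bool.false_eq_true, ite_true, ite_false]
    · simp only [List.mem_cons, forall_eq_or_imp, hs, true_and]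
      exact ih
    · constructor
      · intro h; exact absurd h (pv_go_cur_ne_nil rest [c] (by simp))
      · intro h; exact absurd (h c (by simp)) (by simp [hs])

lemma pv_strip_nil (cs : List Char) :
    (PySem.Chars.strip cs = []) ↔ ∀ c ∈ cs, PySem.Chars.isspace c = true := by
  unfold PySem.Chars.strip PySem.Chars.rstrip PySem.Chars.lstrip
  constructor
  · intro h c hc
    have h' : List.dropWhile PySem.Chars.isspace (List.dropWhile PySem.Chars.isspace cs).reverse = [] := by
      simpa using congrArg List.reverse h
    rw [List.dropWhile_eq_nil_iff] at h'
    have hc' : c ∈ List.takeWhile PySem.Chars.isspace cs ++ List.dropWhile PySem.Chars.isspace cs := by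
      rw [List.takeWhile_append_dropWhile]; exact hc
    rcases List.mem_append.1 hc' with h1 | h1
    · exact List.mem_takeWhile_imp h1
    · exact h' c (List.mem_reverse.2 h1)
  · intro h
    have h2 : List.dropWhile PySem.Chars.isspace cs = [] :=
      List.dropWhile_eq_nil_iff.2 h
    simp [h2]

-- B's word accumulator computes exactly Python's str.split()
lemma pv_words (cs : List Char) : ∀ (ws : List String) (cur : List Char) (d e : Bool),
    (if (cs.foldl pvPaso (ws, cur, d, e)).2.1.isEmpty then (cs.foldl pvPaso (ws, cur, d, e)).1
     else (cs.foldl pvPaso (ws, cur, d, e)).1 ++ [String.ofList (cs.foldl pvPaso (ws, cur, d, e)).2.1])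
    = ws ++ (PySem.Chars.split₀.go cs cur.reverse []).map String.ofList := by
  induction cs with
  | nil =>
    intro ws cur d e
    cases cur <;> simp [PySem.Chars.split₀.go]
  | cons c rest ih =>
    intro ws cur d e
    simp only [List.foldl_cons, PySem.Chars.split₀.go, pvPaso]
    by_cases hs : PySem.Chars.isspace c
    · by_cases hc : cur.isEmpty
      · have hc' : cur = [] := List.isEmpty_iff.1 hc
        subst hc'
        simp only [hs, if_true, ite_true, List.isEmpty_nil, List.reverse_nil]
        exact ih ws [] d e
      · have hcr : cur.reverse.isEmpty = false := by
          cases cur <;> simp_all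
        simp only [hs, hc, hcr, if_true, if_false, Bool.false_eq_true, ite_true, ite_false]
        rw [ih (ws ++ [String.ofList cur]) [] d e]
        rw [pv_go_acc rest [] [cur.reverse.reverse]]
        simp
    · have hrev : (cur ++ [c]).reverse = c :: cur.reverse := by simp
      by_cases hdg : PySem.Chars.isdigit c
      · simp only [hs, hdg, Bool.false_eq_true, if_false, ite_false, if_true, ite_true]
        rw [ih ws (cur ++ [c]) true e, hrev]
      · by_cases ha : PySem.Chars.isalpha c
        · simp only [hs, hdg, ha, Bool.false_eq_true, if_false, ite_false, Bool.not_true, if_true, ite_true]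
          rw [ih ws (cur ++ [c]) d e, hrev]
        · simp only [hs, hdg, ha, Bool.false_eq_true, if_false, ite_false, Bool.not_false, if_true, ite_true]
          rw [ih ws (cur ++ [c]) d true, hrev]

lemma pv_space_nondigit (c : Char) (h : PySem.Chars.isspace c = true) : PySem.Chars.isdigit c = false := by
  simp only [PySem.Chars.isspace, Bool.or_eq_true, Bool.and_eq_true, decide_eq_true_eq] at h
  simp only [PySem.Chars.isdigit, Bool.and_eq_false_iff, decide_eq_false_iff_not, Char.le_def,
    UInt32.le_iff_toNat_le]
  have h0 : ('0' : Char).val.toNat = 48 := by decide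
  have h9 : ('9' : Char).val.toNat = 57 := by decide
  have hc : c.toNat = c.val.toNat := rfl
  omega

-- the digit/special flags of B's pass
lemma pv_flags (cs : List Char) : ∀ (ws : List String) (cur : List Char) (d e : Bool),
    (cs.foldl pvPaso (ws, cur, d, e)).2.2 =
      (d || cs.any PySem.Chars.isdigit,
       e || cs.any (fun c => !PySem.Chars.isspace c && !PySem.Chars.isdigit c && !PySem.Chars.isalpha c)) := by
  induction cs with
  | nil => intro ws cur d e; simp
  | cons c rest ih =>
    intro ws cur d e
    simp only [List.foldl_cons, List.any_cons, pvPaso]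
    by_cases hs : PySem.Chars.isspace c
    · have hd := pv_space_nondigit c hs
      by_cases hc : cur.isEmpty <;> simp [hs, hc, hd, ih, Bool.or_assoc]
    · by_cases hdg : PySem.Chars.isdigit c
      · simp [hs, hdg, ih, Bool.or_assoc]
      · by_cases ha : PySem.Chars.isalpha c <;> simp [hs, hdg, ha, ih, Bool.or_assoc]

lemma pv_ofList_eq_empty (l : List Char) : (String.ofList l = "") ↔ l = [] := by
  constructor
  · intro h
    have := congrArg String.toList h
    simpa using this
  · intro h; subst h; rfl

lemma pv_clasificar_spec (nombre : String) :
    pvClasificar nombre =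
      (if PySem.Str.strip nombre = "" then (false, "Está vacío o solo contiene espacios")
       else if (PySem.Str.split₀ nombre).length < 2 then (false, "No tiene al menos dos palabras")
       else if nombre.toList.any PySem.Chars.isdigit then (false, "Contiene números")
       else if nombre.toList.any (fun c => !PySem.Chars.isalpha c && !PySem.Chars.isspace c) then (false, "Contiene caracteres especiales")
       else (true, PySem.Str.join " " (PySem.Str.split₀ nombre))) := by
  have hw := pv_words nombre.toList [] [] false false
  have hf := pv_flags nombre.toList [] [] false false
  have hd : (nombre.toList.foldl pvPaso ([], [], false, false)).2.2.1 = nombre.toList.any PySem.Chars.isdigit := by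
    rw [hf]; simp
  have he : (nombre.toList.foldl pvPaso ([], [], false, false)).2.2.2 =
      nombre.toList.any (fun c => !PySem.Chars.isspace c && !PySem.Chars.isdigit c && !PySem.Chars.isalpha c) := by
    rw [hf]; simp
  have hsplit : PySem.Str.split₀ nombre = (PySem.Chars.split₀ nombre.toList).map String.ofList := rfl
  have hw' : (if (nombre.toList.foldl pvPaso ([], [], false, false)).2.1.isEmpty
        then (nombre.toList.foldl pvPaso ([], [], false, false)).1
        else (nombre.toList.foldl pvPaso ([], [], false, false)).1 ++
          [String.ofList (nombre.toList.foldl pvPaso ([], [], false, false)).2.1])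
      = PySem.Str.split₀ nombre := by
    rw [hw]; simp [hsplit, PySem.Chars.split₀]
  -- first condition: empty word list ↔ strip gives ""
  have h1 : (PySem.Str.split₀ nombre).isEmpty = decide (PySem.Str.strip nombre = "") := by
    have hiff : (PySem.Str.strip nombre = "") ↔ (PySem.Chars.strip nombre.toList = []) := by
      unfold PySem.Str.strip
      exact pv_ofList_eq_empty _
    have hiff2 : (PySem.Str.split₀ nombre).isEmpty = true ↔ (PySem.Str.strip nombre = "") := by
      rw [hsplit, List.isEmpty_iff, List.map_eq_nil_iff, pv_split_nil, hiff, pv_strip_nil]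
    by_cases h : PySem.Str.strip nombre = ""
    · simp [h, hiff2.2 h]
    · cases hb : (PySem.Str.split₀ nombre).isEmpty
      · simp [h]
      · exact absurd (hiff2.1 hb) h
  unfold pvClasificar
  simp only [hw', hd, he, h1]
  by_cases hstrip : PySem.Str.strip nombre = ""
  · simp [hstrip]
  · simp only [hstrip, decide_false, Bool.false_eq_true, if_false, ite_false]
    by_cases hlen : (PySem.Str.split₀ nombre).length < 2
    · simp [hlen]
    · simp only [hlen, if_false, ite_false]
      by_cases hdig : nombre.toList.any PySem.Chars.isdigit = true
      · simp [hdig]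
      · have hnd : ∀ c ∈ nombre.toList, PySem.Chars.isdigit c = false := by
          simpa [List.any_eq_false] using hdig
        have hpred : nombre.toList.any (fun c => !PySem.Chars.isspace c && !PySem.Chars.isdigit c && !PySem.Chars.isalpha c)
            = nombre.toList.any (fun c => !PySem.Chars.isalpha c && !PySem.Chars.isspace c) := by
          cases hcase : nombre.toList.any (fun c => !PySem.Chars.isalpha c && !PySem.Chars.isspace c)
          · simp only [List.any_eq_false] at hcase ⊢
            intro c hc
            have h2 := hcase c hc
            have hdc := hnd c hc
            by_cases hsp : PySem.Chars.isspace c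
            · simp [hsp]
            · have hspf : PySem.Chars.isspace c = false := by simpa using hsp
              cases hal : PySem.Chars.isalpha c
              · exact absurd h2 (by simp [hal, hspf])
              · simp [hal]
          · simp only [List.any_eq_true] at hcase ⊢
            obtain ⟨c, hc, hp⟩ := hcase
            refine ⟨c, hc, ?_⟩
            have hdc := hnd c hc
            simp_all
        simp only [Bool.not_eq_true] at hdig
        simp [hdig, hpred]

lemma pv_step (acc : List String × List (String × String)) (nombre : String) :
    (if PySem.Str.strip nombre = "" then
      (acc.1, acc.2 ++ [(nombre, "Está vacío o solo contiene espacios")])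
    else
      let palabras := PySem.Str.split₀ nombre
      if palabras.length < 2 then
        (acc.1, acc.2 ++ [(nombre, "No tiene al menos dos palabras")])
      else if nombre.toList.any PySem.Chars.isdigit then
        (acc.1, acc.2 ++ [(nombre, "Contiene números")])
      else if nombre.toList.any (fun c => !PySem.Chars.isalpha c && !PySem.Chars.isspace c) then
        (acc.1, acc.2 ++ [(nombre, "Contiene caracteres especiales")])
      else
        (acc.1 ++ [PySem.Str.join " " palabras], acc.2))
    = (let r := pvClasificar nombre
       if r.1 then (acc.1 ++ [r.2], acc.2) else (acc.1, acc.2 ++ [(nombre, r.2)])) := by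
  simp only [pv_clasificar_spec]
  split_ifs <;> simp_all

-- ===== VERDICT (by name: the statement is the Claim_ definition above) =====
theorem filtrar_nombres_spec : Claim_equal_filtrar_nombres := by
  intro l _
  unfold Spec_filtrar_nombres filtrar_nombres filtrar_nombres_alt
  congr 1
  funext acc nombre
  exact pv_step acc nombre
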